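-- pv_equiv track=rewrite | github.com/thepowerfuldeez/Tasks | Contest/Olymp Training 1/Шифровка.py | cycling
-- ===== SOURCE A (Python) =====
-- def cycling(word):
--     ALPHABET = "abcdefghijklmnopqrstuvwxyz"
--
--     z = []
--     for i in word:
--         if i.isalpha():
--             z.append(i)
--     length = len(z)
--
--     word = list(word)
--
--     for char in range(len(word)):
--         if word[char].isalpha():
--             if word[char].isupper():
--                 word[char] = ALPHABET[(ALPHABET.index(word[char].lower()) + length) % len(ALPHABET)].upper()
--             else:
--                 word[char] = ALPHABET[(ALPHABET.index(word[char].lower()) + length) % len(ALPHABET)].lower()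
--
--     return "".join(word)
-- ===== SOURCE B (Python) =====
-- def cycling(word):
--     # build a rotated-alphabet translation table once, then translate in one pass
--     lower = "abcdefghijklmnopqrstuvwxyz"
--     upper = lower.upper()
--     shift = sum(map(str.isalpha, word)) % 26
--     rot_lower = lower[shift:] + lower[:shift]
--     rot_upper = upper[shift:] + upper[:shift]
--     table = str.maketrans(lower + upper, rot_lower + rot_upper)
--     return word.translate(table)
-- ===== Notes on version B (the rewrite author's own statement) =====
-- stated objective: idiomatic
-- what changed: Instead of A's per-character ALPHABET.index scan with in-place list mutation, B counts the letters, builds one rotated-alphabet translation table with str.maketrans and applies it in a single word.translate pass (non-letters fall through the table untouched).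
import Mathlib
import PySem

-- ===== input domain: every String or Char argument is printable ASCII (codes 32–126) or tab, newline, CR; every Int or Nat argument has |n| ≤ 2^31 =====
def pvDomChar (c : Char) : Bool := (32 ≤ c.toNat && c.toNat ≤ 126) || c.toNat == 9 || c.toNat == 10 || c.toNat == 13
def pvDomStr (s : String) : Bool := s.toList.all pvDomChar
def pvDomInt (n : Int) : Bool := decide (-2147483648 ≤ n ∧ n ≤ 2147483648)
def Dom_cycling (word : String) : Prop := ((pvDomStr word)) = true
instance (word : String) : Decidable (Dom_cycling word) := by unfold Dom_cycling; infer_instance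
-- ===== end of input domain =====

-- B replaces A's per-character ALPHABET.index scan and in-place list mutation by a
-- precomputed rotated-alphabet translation table (a dict built once) applied in one pass.


-- ===== PORT A =====
def cyclingAlph : List Char := "abcdefghijklmnopqrstuvwxyz".toList

-- body of A's second loop (the assignment to word[char]), as a helper
def cyclingShift (length : Nat) (c : Char) : Char :=
  if PySem.Chars.isalpha c then
    if PySem.Chars.isupper c then
      PySem.Chars.upperChar (PySem.List.pyGetD cyclingAlph
        (PySem.Int.mod ((((PySem.List.index? cyclingAlph (PySem.Chars.lowerChar c)).getD 0 : Nat) : Int) + (length : Int)) 26) 'a')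
    else
      PySem.Chars.lowerChar (PySem.List.pyGetD cyclingAlph
        (PySem.Int.mod ((((PySem.List.index? cyclingAlph (PySem.Chars.lowerChar c)).getD 0 : Nat) : Int) + (length : Int)) 26) 'a')
  else c

def cycling (word : String) : String :=
  let z := word.toList.foldl (fun z i => if PySem.Chars.isalpha i then z ++ [i] else z) ([] : List Char)
  let length := z.length
  let w := word.toList
  let w2 := (PySem.List.pyRange 0 (w.length : Int)).foldl
    (fun w char =>
      match PySem.List.pyGet? w char with
      | none => w
      | some c => w.set char.toNat (cyclingShift length c)) w
  String.ofList w2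

-- ===== PORT B =====
-- str.maketrans(lower+upper, rotated lower+upper): a dict mapping each letter to its shifted letter
def cyclingTable (shift : Int) : PySem.Dict Char Char :=
  let lower : List Char := "abcdefghijklmnopqrstuvwxyz".toList
  let upper : List Char := PySem.Chars.upper lower
  PySem.Dict.ofList ((lower ++ upper).zip
    ((PySem.List.slice lower (some shift) none ++ PySem.List.slice lower none (some shift)) ++
     (PySem.List.slice upper (some shift) none ++ PySem.List.slice upper none (some shift))))

def cycling_alt (word : String) : String :=
  let shift : Int := PySem.Int.mod ((word.toList.map (fun c => if PySem.Chars.isalpha c then (1 : Int) else 0)).sum) 26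
  let table := cyclingTable shift
  String.ofList (word.toList.map (fun c => (table.get? c).getD c))  -- word.translate(table)

-- ===== PRECONDITION & SPEC =====
def Spec_cycling (word : String) (out : String) : Prop := out = cycling_alt word
instance (word : String) (out : String) : Decidable (Spec_cycling word out) := by unfold Spec_cycling; infer_instance

-- ===== CLAIM (what is proved, stated in full; the proofs are below) =====
def Claim_equal_cycling : Prop := ∀ (word : String), Dom_cycling word → Spec_cycling word (cycling word)

-- ===== LEMMAS AND PROOFS =====

-- the 52 letters, in the key order of B's table (lowercase first, like lower+upper)
def pvLetters : List Char := (List.range' 97 26).map Char.ofNat ++ (List.range' 65 26).map Char.ofNat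

lemma mem_letters_of_isalpha (c : Char) (h : PySem.Chars.isalpha c = true) : c ∈ pvLetters := by
  have hmem : ∀ (a n : Nat), a ≤ c.toNat → c.toNat < a + n → c ∈ (List.range' a n).map Char.ofNat := by
    intro a n h1 h2
    exact List.mem_map.2 ⟨c.toNat, List.mem_range'_1.2 ⟨h1, h2⟩, Char.ofNat_toNat c⟩
  simp only [PySem.Chars.isalpha, PySem.Chars.isupper, PySem.Chars.islower, Bool.or_eq_true,
    Bool.and_eq_true, decide_eq_true_eq, Char.le_def] at h
  unfold pvLetters
  rcases h with ⟨h1, h2⟩ | ⟨h1, h2⟩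
  · refine List.mem_append_right _ (hmem 65 26 (by exact_mod_cast h1) ?_)
    have h2' : c.toNat ≤ 90 := by exact_mod_cast h2
    omega
  · refine List.mem_append_left _ (hmem 97 26 (by exact_mod_cast h1) ?_)
    have h2' : c.toNat ≤ 122 := by exact_mod_cast h2
    omega

set_option maxRecDepth 4000 in
lemma isalpha_of_mem_letters : ∀ c ∈ pvLetters, PySem.Chars.isalpha c = true := by
  intro c hc
  fin_cases hc <;> decide

-- A's index loop with in-place set is a map
lemma cycling_loop (f : Char → Char) :
    ∀ (v u : List Char),
      (PySem.List.pyRange (u.length : Int) ((u.length + v.length : Nat) : Int)).foldl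
        (fun (w : List Char) (i : Int) => match PySem.List.pyGet? w i with
          | none => w
          | some c => w.set i.toNat (f c)) (u ++ v)
      = u ++ v.map f := by
  intro v
  induction v with
  | nil =>
    intro u
    rw [PySem.List.pyRange_one_eq_nil (by simp)]
    simp
  | cons x v ih =>
    intro u
    rw [PySem.List.pyRange_one_cons (by push_cast [List.length_cons]; omega)]
    simp only [List.foldl_cons]
    have hget : PySem.List.pyGet? (u ++ x :: v) (u.length : Int) = some x := by
      rw [PySem.List.pyGet?_natCast]
      simp
    rw [hget]
    dsimp only
    have hset : (u ++ x :: v).set ((u.length : Int)).toNat (f x) = (u ++ [f x]) ++ v := by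
      rw [Int.toNat_natCast, List.set_append]
      simp
    rw [hset]
    have harg : ((u.length : Int) + 1) = (((u ++ [f x]).length : Nat) : Int) := by simp
    have harg2 : ((u.length + (x :: v).length : Nat) : Int) = (((u ++ [f x]).length + v.length : Nat) : Int) := by
      simp; omega
    rw [harg, harg2, ih (u ++ [f x])]
    simp

-- the shift only matters mod 26
lemma cyclingShift_mod (n : Nat) (c : Char) : cyclingShift n c = cyclingShift (n % 26) c := by
  have h : ∀ i : Int, PySem.Int.mod (i + (n : Int)) 26 = PySem.Int.mod (i + ((n % 26 : Nat) : Int)) 26 := by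
    intro i
    rw [PySem.Int.mod_eq_emod_of_pos (by norm_num), PySem.Int.mod_eq_emod_of_pos (by norm_num)]
    push_cast
    omega
  simp only [cyclingShift, h]

-- per-shift: B's table as a literal dict, and agreement with A's shift on every letter

set_option maxRecDepth 6000 in
lemma cyclingTab0 : cyclingTable 0 = PySem.Dict.mk [('a', 'a'), ('b', 'b'), ('c', 'c'), ('d', 'd'), ('e', 'e'), ('f', 'f'), ('g', 'g'), ('h', 'h'), ('i', 'i'), ('j', 'j'), ('k', 'k'), ('l', 'l'), ('m', 'm'), ('n', 'n'), ('o', 'o'), ('p', 'p'), ('q', 'q'), ('r', 'r'), ('s', 's'), ('t', 't'), ('u', 'u'), ('v', 'v'), ('w', 'w'), ('x', 'x'), ('y', 'y'), ('z', 'z'), ('A', 'A'), ('B', 'B'), ('C', 'C'), ('D', 'D'), ('E', 'E'), ('F', 'F'), ('G', 'G'), ('H', 'H'), ('I', 'I'), ('J', 'J'), ('K', 'K'), ('L', 'L'), ('M', 'M'), ('N', 'N'), ('O', 'O'), ('P', 'P'), ('Q', 'Q'), ('R', 'R'), ('S', 'S'), ('T', 'T'), ('U', 'U'), ('V', 'V'),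 ('W', 'W'), ('X', 'X'), ('Y', 'Y'), ('Z', 'Z')] := by decide

set_option maxRecDepth 4000 in
lemma cyclingKeyA0 : ∀ c ∈ pvLetters, cyclingShift 0 c = ((cyclingTable (0 : Int)).get? c).getD c := by
  intro c hc
  rw [cyclingTab0]
  fin_cases hc <;> decide

set_option maxRecDepth 6000 in
lemma cyclingTab1 : cyclingTable 1 = PySem.Dict.mk [('a', 'b'), ('b', 'c'), ('c', 'd'), ('d', 'e'), ('e', 'f'), ('f', 'g'), ('g', 'h'), ('h', 'i'), ('i', 'j'), ('j', 'k'), ('k', 'l'), ('l', 'm'), ('m', 'n'), ('n', 'o'), ('o', 'p'), ('p', 'q'), ('q', 'r'), ('r', 's'), ('s', 't'), ('t', 'u'), ('u', 'v'), ('v', 'w'), ('w', 'x'), ('x', 'y'), ('y', 'z'), ('z', 'a'), ('A', 'B'), ('B', 'C'), ('C', 'D'), ('D', 'E'), ('E', 'F'), ('F', 'G'), ('G', 'H'), ('H', 'I'), ('I', 'J'), ('J', 'K'), ('K', 'L'), ('L', 'M'), ('M', 'N'), ('N', 'O'), ('O', 'P'), ('P', 'Q'), ('Q', 'R'), ('R',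 'S'), ('S', 'T'), ('T', 'U'), ('U', 'V'), ('V', 'W'), ('W', 'X'), ('X', 'Y'), ('Y', 'Z'), ('Z', 'A')] := by decide

set_option maxRecDepth 4000 in
lemma cyclingKeyA1 : ∀ c ∈ pvLetters, cyclingShift 1 c = ((cyclingTable (1 : Int)).get? c).getD c := by
  intro c hc
  rw [cyclingTab1]
  fin_cases hc <;> decide

set_option maxRecDepth 6000 in
lemma cyclingTab2 : cyclingTable 2 = PySem.Dict.mk [('a', 'c'), ('b', 'd'), ('c', 'e'), ('d', 'f'), ('e', 'g'), ('f', 'h'), ('g', 'i'), ('h', 'j'), ('i', 'k'), ('j', 'l'), ('k', 'm'), ('l', 'n'), ('m', 'o'), ('n', 'p'), ('o', 'q'), ('p', 'r'), ('q', 's'), ('r', 't'), ('s', 'u'), ('t', 'v'), ('u', 'w'), ('v', 'x'), ('w', 'y'), ('x', 'z'), ('y', 'a'), ('z', 'b'), ('A', 'C'), ('B', 'D'), ('C', 'E'), ('D', 'F'), ('E', 'G'), ('F', 'H'), ('G', 'I'), ('H', 'J'), ('I', 'K'), ('J', 'L'), ('K', 'M'), ('L', 'N'), ('M', 'O'), ('N',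 'P'), ('O', 'Q'), ('P', 'R'), ('Q', 'S'), ('R', 'T'), ('S', 'U'), ('T', 'V'), ('U', 'W'), ('V', 'X'), ('W', 'Y'), ('X', 'Z'), ('Y', 'A'), ('Z', 'B')] := by decide

set_option maxRecDepth 4000 in
lemma cyclingKeyA2 : ∀ c ∈ pvLetters, cyclingShift 2 c = ((cyclingTable (2 : Int)).get? c).getD c := by
  intro c hc
  rw [cyclingTab2]
  fin_cases hc <;> decide

set_option maxRecDepth 6000 in
lemma cyclingTab3 : cyclingTable 3 = PySem.Dict.mk [('a', 'd'), ('b', 'e'), ('c', 'f'), ('d', 'g'), ('e', 'h'), ('f', 'i'), ('g', 'j'), ('h', 'k'), ('i', 'l'), ('j', 'm'), ('k', 'n'), ('l', 'o'), ('m', 'p'), ('n', 'q'), ('o', 'r'), ('p', 's'), ('q', 't'), ('r', 'u'), ('s', 'v'), ('t', 'w'), ('u', 'x'), ('v', 'y'), ('w', 'z'), ('x', 'a'), ('y', 'b'), ('z', 'c'), ('A', 'D'), ('B', 'E'), ('C', 'F'), ('D', 'G'), ('E', 'H'), ('F', 'I'), ('G', 'J'), ('H', 'K'), ('I', 'L'),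 ('J', 'M'), ('K', 'N'), ('L', 'O'), ('M', 'P'), ('N', 'Q'), ('O', 'R'), ('P', 'S'), ('Q', 'T'), ('R', 'U'), ('S', 'V'), ('T', 'W'), ('U', 'X'), ('V', 'Y'), ('W', 'Z'), ('X', 'A'), ('Y', 'B'), ('Z', 'C')] := by decide

set_option maxRecDepth 4000 in
lemma cyclingKeyA3 : ∀ c ∈ pvLetters, cyclingShift 3 c = ((cyclingTable (3 : Int)).get? c).getD c := by
  intro c hc
  rw [cyclingTab3]
  fin_cases hc <;> decide

set_option maxRecDepth 6000 in
lemma cyclingTab4 : cyclingTable 4 = PySem.Dict.mk [('a', 'e'), ('b', 'f'), ('c', 'g'), ('d', 'h'), ('e', 'i'), ('f', 'j'), ('g', 'k'), ('h', 'l'), ('i', 'm'), ('j', 'n'), ('k', 'o'), ('l', 'p'), ('m', 'q'), ('n', 'r'), ('o', 's'), ('p', 't'), ('q', 'u'), ('r', 'v'), ('s', 'w'), ('t', 'x'), ('u', 'y'), ('v', 'z'), ('w', 'a'), ('x', 'b'), ('y', 'c'), ('z', 'd'), ('A', 'E'), ('B', 'F'), ('C', 'G'), ('D', 'H'), ('E',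 'I'), ('F', 'J'), ('G', 'K'), ('H', 'L'), ('I', 'M'), ('J', 'N'), ('K', 'O'), ('L', 'P'), ('M', 'Q'), ('N', 'R'), ('O', 'S'), ('P', 'T'), ('Q', 'U'), ('R', 'V'), ('S', 'W'), ('T', 'X'), ('U', 'Y'), ('V', 'Z'), ('W', 'A'), ('X', 'B'), ('Y', 'C'), ('Z', 'D')] := by decide

set_option maxRecDepth 4000 in
lemma cyclingKeyA4 : ∀ c ∈ pvLetters, cyclingShift 4 c = ((cyclingTable (4 : Int)).get? c).getD c := by
  intro c hc
  rw [cyclingTab4]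
  fin_cases hc <;> decide

set_option maxRecDepth 6000 in
lemma cyclingTab5 : cyclingTable 5 = PySem.Dict.mk [('a', 'f'), ('b', 'g'), ('c', 'h'), ('d', 'i'), ('e', 'j'), ('f', 'k'), ('g', 'l'), ('h', 'm'), ('i', 'n'), ('j', 'o'), ('k', 'p'), ('l', 'q'), ('m', 'r'), ('n', 's'), ('o', 't'), ('p', 'u'), ('q', 'v'), ('r', 'w'), ('s', 'x'), ('t', 'y'), ('u', 'z'), ('v', 'a'), ('w', 'b'), ('x', 'c'), ('y', 'd'), ('z', 'e'), ('A', 'F'), ('B', 'G'), ('C', 'H'), ('D', 'I'), ('E', 'J'), ('F', 'K'), ('G', 'L'), ('H', 'M'), ('I', 'N'), ('J', 'O'), ('K', 'P'), ('L', 'Q'), ('M', 'R'), ('N', 'S'), ('O', 'T'), ('P', 'U'), ('Q', 'V'), ('R', 'W'), ('S', 'X'), ('T', 'Y'), ('U', 'Z'), ('V', 'A'), ('W', 'B'), ('X', 'C'), ('Y', 'D'), ('Z', 'E')] := by decide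

set_option maxRecDepth 4000 in
lemma cyclingKeyA5 : ∀ c ∈ pvLetters, cyclingShift 5 c = ((cyclingTable (5 : Int)).get? c).getD c := by
  intro c hc
  rw [cyclingTab5]
  fin_cases hc <;> decide

set_option maxRecDepth 6000 in
lemma cyclingTab6 : cyclingTable 6 = PySem.Dict.mk [('a', 'g'), ('b', 'h'), ('c', 'i'), ('d', 'j'), ('e', 'k'), ('f', 'l'), ('g', 'm'), ('h', 'n'), ('i', 'o'), ('j', 'p'), ('k', 'q'), ('l', 'r'), ('m', 's'), ('n', 't'), ('o', 'u'), ('p', 'v'), ('q', 'w'), ('r', 'x'), ('s', 'y'), ('t', 'z'), ('u', 'a'), ('v', 'b'), ('w', 'c'), ('x', 'd'), ('y', 'e'), ('z', 'f'), ('A', 'G'), ('B', 'H'), ('C', 'I'), ('D', 'J'), ('E', 'K'), ('F', 'L'), ('G', 'M'), ('H', 'N'), ('I', 'O'), ('J', 'P'), ('K', 'Q'), ('L', 'R'), ('M', 'S'), ('N', 'T'), ('O', 'U'), ('P', 'V'), ('Q', 'W'), ('R', 'X'), ('S', 'Y'), ('T', 'Z'), ('U', 'A'), ('V', 'B'), ('W',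 'C'), ('X', 'D'), ('Y', 'E'), ('Z', 'F')] := by decide

set_option maxRecDepth 4000 in
lemma cyclingKeyA6 : ∀ c ∈ pvLetters, cyclingShift 6 c = ((cyclingTable (6 : Int)).get? c).getD c := by
  intro c hc
  rw [cyclingTab6]
  fin_cases hc <;> decide

set_option maxRecDepth 6000 in
lemma cyclingTab7 : cyclingTable 7 = PySem.Dict.mk [('a', 'h'), ('b', 'i'), ('c', 'j'), ('d', 'k'), ('e', 'l'), ('f', 'm'), ('g', 'n'), ('h', 'o'), ('i', 'p'), ('j', 'q'), ('k', 'r'), ('l', 's'), ('m', 't'), ('n', 'u'), ('o', 'v'), ('p', 'w'), ('q', 'x'), ('r', 'y'), ('s', 'z'), ('t', 'a'), ('u', 'b'), ('v', 'c'), ('w', 'd'), ('x', 'e'), ('y', 'f'), ('z', 'g'), ('A', 'H'), ('B', 'I'), ('C', 'J'), ('D', 'K'), ('E', 'L'), ('F', 'M'), ('G', 'N'), ('H', 'O'), ('I', 'P'), ('J', 'Q'), ('K', 'R'), ('L', 'S'), ('M', 'T'), ('N', 'U'), ('O', 'V'), ('P', 'W'), ('Q', 'X'), ('R', 'Y'),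 ('S', 'Z'), ('T', 'A'), ('U', 'B'), ('V', 'C'), ('W', 'D'), ('X', 'E'), ('Y', 'F'), ('Z', 'G')] := by decide

set_option maxRecDepth 4000 in
lemma cyclingKeyA7 : ∀ c ∈ pvLetters, cyclingShift 7 c = ((cyclingTable (7 : Int)).get? c).getD c := by
  intro c hc
  rw [cyclingTab7]
  fin_cases hc <;> decide

set_option maxRecDepth 6000 in
lemma cyclingTab8 : cyclingTable 8 = PySem.Dict.mk [('a', 'i'), ('b', 'j'), ('c', 'k'), ('d', 'l'), ('e', 'm'), ('f', 'n'), ('g', 'o'), ('h', 'p'), ('i', 'q'), ('j', 'r'), ('k', 's'), ('l', 't'), ('m', 'u'), ('n', 'v'), ('o', 'w'), ('p', 'x'), ('q', 'y'), ('r', 'z'), ('s', 'a'), ('t', 'b'), ('u', 'c'), ('v', 'd'), ('w', 'e'), ('x', 'f'), ('y', 'g'), ('z', 'h'), ('A', 'I'), ('B', 'J'), ('C', 'K'), ('D', 'L'), ('E', 'M'), ('F', 'N'), ('G', 'O'), ('H', 'P'), ('I', 'Q'), ('J', 'R'), ('K', 'S'), ('L', 'T'), ('M', 'U'), ('N', 'V'),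 ('O', 'W'), ('P', 'X'), ('Q', 'Y'), ('R', 'Z'), ('S', 'A'), ('T', 'B'), ('U', 'C'), ('V', 'D'), ('W', 'E'), ('X', 'F'), ('Y', 'G'), ('Z', 'H')] := by decide

set_option maxRecDepth 4000 in
lemma cyclingKeyA8 : ∀ c ∈ pvLetters, cyclingShift 8 c = ((cyclingTable (8 : Int)).get? c).getD c := by
  intro c hc
  rw [cyclingTab8]
  fin_cases hc <;> decide

set_option maxRecDepth 6000 in
lemma cyclingTab9 : cyclingTable 9 = PySem.Dict.mk [('a', 'j'), ('b', 'k'), ('c', 'l'), ('d', 'm'), ('e', 'n'), ('f', 'o'), ('g', 'p'), ('h', 'q'), ('i', 'r'), ('j', 's'), ('k', 't'), ('l', 'u'), ('m', 'v'), ('n', 'w'), ('o', 'x'), ('p', 'y'), ('q', 'z'), ('r', 'a'), ('s', 'b'), ('t', 'c'), ('u', 'd'), ('v', 'e'), ('w', 'f'), ('x', 'g'), ('y', 'h'), ('z', 'i'), ('A', 'J'), ('B', 'K'), ('C', 'L'), ('D', 'M'), ('E', 'N'), ('F', 'O'), ('G', 'P'), ('H', 'Q'), ('I', 'R'), ('J',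 'S'), ('K', 'T'), ('L', 'U'), ('M', 'V'), ('N', 'W'), ('O', 'X'), ('P', 'Y'), ('Q', 'Z'), ('R', 'A'), ('S', 'B'), ('T', 'C'), ('U', 'D'), ('V', 'E'), ('W', 'F'), ('X', 'G'), ('Y', 'H'), ('Z', 'I')] := by decide

set_option maxRecDepth 4000 in
lemma cyclingKeyA9 : ∀ c ∈ pvLetters, cyclingShift 9 c = ((cyclingTable (9 : Int)).get? c).getD c := by
  intro c hc
  rw [cyclingTab9]
  fin_cases hc <;> decide

set_option maxRecDepth 6000 in
lemma cyclingTab10 : cyclingTable 10 = PySem.Dict.mk [('a', 'k'), ('b', 'l'), ('c', 'm'), ('d', 'n'), ('e', 'o'), ('f', 'p'), ('g', 'q'), ('h', 'r'), ('i', 's'), ('j', 't'), ('k', 'u'), ('l', 'v'), ('m', 'w'), ('n', 'x'), ('o', 'y'), ('p', 'z'), ('q', 'a'), ('r', 'b'), ('s', 'c'), ('t', 'd'), ('u', 'e'), ('v', 'f'), ('w', 'g'), ('x', 'h'), ('y', 'i'), ('z', 'j'), ('A', 'K'), ('B', 'L'), ('C', 'M'), ('D', 'N'), ('E', 'O'),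 ('F', 'P'), ('G', 'Q'), ('H', 'R'), ('I', 'S'), ('J', 'T'), ('K', 'U'), ('L', 'V'), ('M', 'W'), ('N', 'X'), ('O', 'Y'), ('P', 'Z'), ('Q', 'A'), ('R', 'B'), ('S', 'C'), ('T', 'D'), ('U', 'E'), ('V', 'F'), ('W', 'G'), ('X', 'H'), ('Y', 'I'), ('Z', 'J')] := by decide

set_option maxRecDepth 4000 in
lemma cyclingKeyA10 : ∀ c ∈ pvLetters, cyclingShift 10 c = ((cyclingTable (10 : Int)).get? c).getD c := by
  intro c hc
  rw [cyclingTab10]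
  fin_cases hc <;> decide

set_option maxRecDepth 6000 in
lemma cyclingTab11 : cyclingTable 11 = PySem.Dict.mk [('a', 'l'), ('b', 'm'), ('c', 'n'), ('d', 'o'), ('e', 'p'), ('f', 'q'), ('g', 'r'), ('h', 's'), ('i', 't'), ('j', 'u'), ('k', 'v'), ('l', 'w'), ('m', 'x'), ('n', 'y'), ('o', 'z'), ('p', 'a'), ('q', 'b'), ('r', 'c'), ('s', 'd'), ('t', 'e'), ('u', 'f'), ('v', 'g'), ('w', 'h'), ('x', 'i'), ('y', 'j'), ('z', 'k'), ('A', 'L'), ('B', 'M'), ('C', 'N'), ('D', 'O'), ('E', 'P'), ('F', 'Q'), ('G', 'R'), ('H', 'S'), ('I', 'T'), ('J', 'U'), ('K', 'V'), ('L', 'W'), ('M', 'X'), ('N', 'Y'), ('O', 'Z'), ('P', 'A'), ('Q', 'B'), ('R', 'C'), ('S', 'D'), ('T', 'E'), ('U', 'F'), ('V', 'G'), ('W', 'H'), ('X', 'I'), ('Y', 'J'), ('Z', 'K')] := by decide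

set_option maxRecDepth 4000 in
lemma cyclingKeyA11 : ∀ c ∈ pvLetters, cyclingShift 11 c = ((cyclingTable (11 : Int)).get? c).getD c := by
  intro c hc
  rw [cyclingTab11]
  fin_cases hc <;> decide

set_option maxRecDepth 6000 in
lemma cyclingTab12 : cyclingTable 12 = PySem.Dict.mk [('a', 'm'), ('b', 'n'), ('c', 'o'), ('d', 'p'), ('e', 'q'), ('f', 'r'), ('g', 's'), ('h', 't'), ('i', 'u'), ('j', 'v'), ('k', 'w'), ('l', 'x'), ('m', 'y'), ('n', 'z'), ('o', 'a'), ('p', 'b'), ('q', 'c'), ('r', 'd'), ('s', 'e'), ('t', 'f'), ('u', 'g'), ('v', 'h'), ('w', 'i'), ('x', 'j'), ('y', 'k'), ('z', 'l'), ('A', 'M'), ('B', 'N'), ('C', 'O'), ('D', 'P'), ('E', 'Q'), ('F', 'R'), ('G', 'S'), ('H', 'T'), ('I', 'U'), ('J', 'V'), ('K', 'W'), ('L', 'X'), ('M', 'Y'), ('N', 'Z'), ('O', 'A'), ('P', 'B'), ('Q', 'C'), ('R', 'D'), ('S', 'E'), ('T', 'F'), ('U', 'G'), ('V', 'H'), ('W',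 'I'), ('X', 'J'), ('Y', 'K'), ('Z', 'L')] := by decide

set_option maxRecDepth 4000 in
lemma cyclingKeyA12 : ∀ c ∈ pvLetters, cyclingShift 12 c = ((cyclingTable (12 : Int)).get? c).getD c := by
  intro c hc
  rw [cyclingTab12]
  fin_cases hc <;> decide

set_option maxRecDepth 6000 in
lemma cyclingTab13 : cyclingTable 13 = PySem.Dict.mk [('a', 'n'), ('b', 'o'), ('c', 'p'), ('d', 'q'), ('e', 'r'), ('f', 's'), ('g', 't'), ('h', 'u'), ('i', 'v'), ('j', 'w'), ('k', 'x'), ('l', 'y'), ('m', 'z'), ('n', 'a'), ('o', 'b'), ('p', 'c'), ('q', 'd'), ('r', 'e'), ('s', 'f'), ('t', 'g'), ('u', 'h'), ('v', 'i'), ('w', 'j'), ('x', 'k'), ('y', 'l'), ('z', 'm'), ('A', 'N'), ('B', 'O'), ('C', 'P'), ('D', 'Q'), ('E', 'R'), ('F', 'S'), ('G', 'T'), ('H', 'U'), ('I', 'V'), ('J', 'W'), ('K', 'X'), ('L', 'Y'), ('M', 'Z'), ('N', 'A'), ('O', 'B'), ('P', 'C'), ('Q', 'D'), ('R', 'E'),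 ('S', 'F'), ('T', 'G'), ('U', 'H'), ('V', 'I'), ('W', 'J'), ('X', 'K'), ('Y', 'L'), ('Z', 'M')] := by decide

set_option maxRecDepth 4000 in
lemma cyclingKeyA13 : ∀ c ∈ pvLetters, cyclingShift 13 c = ((cyclingTable (13 : Int)).get? c).getD c := by
  intro c hc
  rw [cyclingTab13]
  fin_cases hc <;> decide

set_option maxRecDepth 6000 in
lemma cyclingTab14 : cyclingTable 14 = PySem.Dict.mk [('a', 'o'), ('b', 'p'), ('c', 'q'), ('d', 'r'), ('e', 's'), ('f', 't'), ('g', 'u'), ('h', 'v'), ('i', 'w'), ('j', 'x'), ('k', 'y'), ('l', 'z'), ('m', 'a'), ('n', 'b'), ('o', 'c'), ('p', 'd'), ('q', 'e'), ('r', 'f'), ('s', 'g'), ('t', 'h'), ('u', 'i'), ('v', 'j'), ('w', 'k'), ('x', 'l'), ('y', 'm'), ('z', 'n'), ('A', 'O'), ('B', 'P'), ('C', 'Q'), ('D', 'R'), ('E', 'S'), ('F', 'T'), ('G', 'U'), ('H', 'V'), ('I', 'W'), ('J', 'X'), ('K', 'Y'), ('L', 'Z'), ('M', 'A'), ('N',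 'B'), ('O', 'C'), ('P', 'D'), ('Q', 'E'), ('R', 'F'), ('S', 'G'), ('T', 'H'), ('U', 'I'), ('V', 'J'), ('W', 'K'), ('X', 'L'), ('Y', 'M'), ('Z', 'N')] := by decide

set_option maxRecDepth 4000 in
lemma cyclingKeyA14 : ∀ c ∈ pvLetters, cyclingShift 14 c = ((cyclingTable (14 : Int)).get? c).getD c := by
  intro c hc
  rw [cyclingTab14]
  fin_cases hc <;> decide

set_option maxRecDepth 6000 in
lemma cyclingTab15 : cyclingTable 15 = PySem.Dict.mk [('a', 'p'), ('b', 'q'), ('c', 'r'), ('d', 's'), ('e', 't'), ('f', 'u'), ('g', 'v'), ('h', 'w'), ('i', 'x'), ('j', 'y'), ('k', 'z'), ('l', 'a'), ('m', 'b'), ('n', 'c'), ('o', 'd'), ('p', 'e'), ('q', 'f'), ('r', 'g'), ('s', 'h'), ('t', 'i'), ('u', 'j'), ('v', 'k'), ('w', 'l'), ('x', 'm'), ('y', 'n'), ('z', 'o'), ('A', 'P'), ('B', 'Q'), ('C', 'R'), ('D', 'S'), ('E', 'T'), ('F', 'U'), ('G', 'V'), ('H', 'W'), ('I', 'X'), ('J',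 'Y'), ('K', 'Z'), ('L', 'A'), ('M', 'B'), ('N', 'C'), ('O', 'D'), ('P', 'E'), ('Q', 'F'), ('R', 'G'), ('S', 'H'), ('T', 'I'), ('U', 'J'), ('V', 'K'), ('W', 'L'), ('X', 'M'), ('Y', 'N'), ('Z', 'O')] := by decide

set_option maxRecDepth 4000 in
lemma cyclingKeyA15 : ∀ c ∈ pvLetters, cyclingShift 15 c = ((cyclingTable (15 : Int)).get? c).getD c := by
  intro c hc
  rw [cyclingTab15]
  fin_cases hc <;> decide

set_option maxRecDepth 6000 in
lemma cyclingTab16 : cyclingTable 16 = PySem.Dict.mk [('a', 'q'), ('b', 'r'), ('c', 's'), ('d', 't'), ('e', 'u'), ('f', 'v'), ('g', 'w'), ('h', 'x'), ('i', 'y'), ('j', 'z'), ('k', 'a'), ('l', 'b'), ('m', 'c'), ('n', 'd'), ('o', 'e'), ('p', 'f'), ('q', 'g'), ('r', 'h'), ('s', 'i'), ('t', 'j'), ('u', 'k'), ('v', 'l'), ('w', 'm'), ('x', 'n'), ('y', 'o'), ('z', 'p'), ('A', 'Q'), ('B', 'R'), ('C', 'S'), ('D', 'T'), ('E', 'U'),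 ('F', 'V'), ('G', 'W'), ('H', 'X'), ('I', 'Y'), ('J', 'Z'), ('K', 'A'), ('L', 'B'), ('M', 'C'), ('N', 'D'), ('O', 'E'), ('P', 'F'), ('Q', 'G'), ('R', 'H'), ('S', 'I'), ('T', 'J'), ('U', 'K'), ('V', 'L'), ('W', 'M'), ('X', 'N'), ('Y', 'O'), ('Z', 'P')] := by decide

set_option maxRecDepth 4000 in
lemma cyclingKeyA16 : ∀ c ∈ pvLetters, cyclingShift 16 c = ((cyclingTable (16 : Int)).get? c).getD c := by
  intro c hc
  rw [cyclingTab16]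
  fin_cases hc <;> decide

set_option maxRecDepth 6000 in
lemma cyclingTab17 : cyclingTable 17 = PySem.Dict.mk [('a', 'r'), ('b', 's'), ('c', 't'), ('d', 'u'), ('e', 'v'), ('f', 'w'), ('g', 'x'), ('h', 'y'), ('i', 'z'), ('j', 'a'), ('k', 'b'), ('l', 'c'), ('m', 'd'), ('n', 'e'), ('o', 'f'), ('p', 'g'), ('q', 'h'), ('r', 'i'), ('s', 'j'), ('t', 'k'), ('u', 'l'), ('v', 'm'), ('w', 'n'), ('x', 'o'), ('y', 'p'), ('z', 'q'), ('A', 'R'), ('B', 'S'), ('C', 'T'), ('D', 'U'), ('E', 'V'), ('F', 'W'), ('G', 'X'), ('H', 'Y'), ('I', 'Z'), ('J', 'A'), ('K', 'B'), ('L', 'C'), ('M', 'D'), ('N', 'E'), ('O', 'F'), ('P', 'G'), ('Q', 'H'), ('R', 'I'), ('S', 'J'), ('T', 'K'), ('U', 'L'), ('V', 'M'), ('W', 'N'), ('X', 'O'), ('Y', 'P'), ('Z', 'Q')] := by decide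

set_option maxRecDepth 4000 in
lemma cyclingKeyA17 : ∀ c ∈ pvLetters, cyclingShift 17 c = ((cyclingTable (17 : Int)).get? c).getD c := by
  intro c hc
  rw [cyclingTab17]
  fin_cases hc <;> decide

set_option maxRecDepth 6000 in
lemma cyclingTab18 : cyclingTable 18 = PySem.Dict.mk [('a', 's'), ('b', 't'), ('c', 'u'), ('d', 'v'), ('e', 'w'), ('f', 'x'), ('g', 'y'), ('h', 'z'), ('i', 'a'), ('j', 'b'), ('k', 'c'), ('l', 'd'), ('m', 'e'), ('n', 'f'), ('o', 'g'), ('p', 'h'), ('q', 'i'), ('r', 'j'), ('s', 'k'), ('t', 'l'), ('u', 'm'), ('v', 'n'), ('w', 'o'), ('x', 'p'), ('y', 'q'), ('z', 'r'), ('A', 'S'), ('B', 'T'), ('C', 'U'), ('D', 'V'), ('E', 'W'), ('F', 'X'), ('G', 'Y'), ('H', 'Z'), ('I', 'A'), ('J', 'B'), ('K', 'C'), ('L', 'D'), ('M', 'E'), ('N', 'F'), ('O', 'G'), ('P', 'H'), ('Q', 'I'), ('R', 'J'), ('S', 'K'), ('T', 'L'), ('U', 'M'), ('V', 'N'), ('W',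 'O'), ('X', 'P'), ('Y', 'Q'), ('Z', 'R')] := by decide

set_option maxRecDepth 4000 in
lemma cyclingKeyA18 : ∀ c ∈ pvLetters, cyclingShift 18 c = ((cyclingTable (18 : Int)).get? c).getD c := by
  intro c hc
  rw [cyclingTab18]
  fin_cases hc <;> decide

set_option maxRecDepth 6000 in
lemma cyclingTab19 : cyclingTable 19 = PySem.Dict.mk [('a', 't'), ('b', 'u'), ('c', 'v'), ('d', 'w'), ('e', 'x'), ('f', 'y'), ('g', 'z'), ('h', 'a'), ('i', 'b'), ('j', 'c'), ('k', 'd'), ('l', 'e'), ('m', 'f'), ('n', 'g'), ('o', 'h'), ('p', 'i'), ('q', 'j'), ('r', 'k'), ('s', 'l'), ('t', 'm'), ('u', 'n'), ('v', 'o'), ('w', 'p'), ('x', 'q'), ('y', 'r'), ('z', 's'), ('A', 'T'), ('B', 'U'), ('C', 'V'), ('D', 'W'), ('E', 'X'), ('F', 'Y'), ('G', 'Z'), ('H', 'A'), ('I', 'B'), ('J', 'C'), ('K', 'D'), ('L', 'E'), ('M', 'F'), ('N', 'G'), ('O', 'H'), ('P', 'I'), ('Q', 'J'), ('R', 'K'),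 ('S', 'L'), ('T', 'M'), ('U', 'N'), ('V', 'O'), ('W', 'P'), ('X', 'Q'), ('Y', 'R'), ('Z', 'S')] := by decide

set_option maxRecDepth 4000 in
lemma cyclingKeyA19 : ∀ c ∈ pvLetters, cyclingShift 19 c = ((cyclingTable (19 : Int)).get? c).getD c := by
  intro c hc
  rw [cyclingTab19]
  fin_cases hc <;> decide

set_option maxRecDepth 6000 in
lemma cyclingTab20 : cyclingTable 20 = PySem.Dict.mk [('a', 'u'), ('b', 'v'), ('c', 'w'), ('d', 'x'), ('e', 'y'), ('f', 'z'), ('g', 'a'), ('h', 'b'), ('i', 'c'), ('j', 'd'), ('k', 'e'), ('l', 'f'), ('m', 'g'), ('n', 'h'), ('o', 'i'), ('p', 'j'), ('q', 'k'), ('r', 'l'), ('s', 'm'), ('t', 'n'), ('u', 'o'), ('v', 'p'), ('w', 'q'), ('x', 'r'), ('y', 's'), ('z', 't'), ('A', 'U'), ('B', 'V'), ('C', 'W'), ('D', 'X'), ('E', 'Y'), ('F', 'Z'), ('G', 'A'), ('H', 'B'), ('I', 'C'), ('J', 'D'), ('K', 'E'), ('L', 'F'), ('M', 'G'), ('N',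 'H'), ('O', 'I'), ('P', 'J'), ('Q', 'K'), ('R', 'L'), ('S', 'M'), ('T', 'N'), ('U', 'O'), ('V', 'P'), ('W', 'Q'), ('X', 'R'), ('Y', 'S'), ('Z', 'T')] := by decide

set_option maxRecDepth 4000 in
lemma cyclingKeyA20 : ∀ c ∈ pvLetters, cyclingShift 20 c = ((cyclingTable (20 : Int)).get? c).getD c := by
  intro c hc
  rw [cyclingTab20]
  fin_cases hc <;> decide

set_option maxRecDepth 6000 in
lemma cyclingTab21 : cyclingTable 21 = PySem.Dict.mk [('a', 'v'), ('b', 'w'), ('c', 'x'), ('d', 'y'), ('e', 'z'), ('f', 'a'), ('g', 'b'), ('h', 'c'), ('i', 'd'), ('j', 'e'), ('k', 'f'), ('l', 'g'), ('m', 'h'), ('n', 'i'), ('o', 'j'), ('p', 'k'), ('q', 'l'), ('r', 'm'), ('s', 'n'), ('t', 'o'), ('u', 'p'), ('v', 'q'), ('w', 'r'), ('x', 's'), ('y', 't'), ('z', 'u'), ('A', 'V'), ('B', 'W'), ('C', 'X'), ('D', 'Y'), ('E', 'Z'), ('F', 'A'), ('G', 'B'), ('H', 'C'), ('I', 'D'),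 ('J', 'E'), ('K', 'F'), ('L', 'G'), ('M', 'H'), ('N', 'I'), ('O', 'J'), ('P', 'K'), ('Q', 'L'), ('R', 'M'), ('S', 'N'), ('T', 'O'), ('U', 'P'), ('V', 'Q'), ('W', 'R'), ('X', 'S'), ('Y', 'T'), ('Z', 'U')] := by decide

set_option maxRecDepth 4000 in
lemma cyclingKeyA21 : ∀ c ∈ pvLetters, cyclingShift 21 c = ((cyclingTable (21 : Int)).get? c).getD c := by
  intro c hc
  rw [cyclingTab21]
  fin_cases hc <;> decide

set_option maxRecDepth 6000 in
lemma cyclingTab22 : cyclingTable 22 = PySem.Dict.mk [('a', 'w'), ('b', 'x'), ('c', 'y'), ('d', 'z'), ('e', 'a'), ('f', 'b'), ('g', 'c'), ('h', 'd'), ('i', 'e'), ('j', 'f'), ('k', 'g'), ('l', 'h'), ('m', 'i'), ('n', 'j'), ('o', 'k'), ('p', 'l'), ('q', 'm'), ('r', 'n'), ('s', 'o'), ('t', 'p'), ('u', 'q'), ('v', 'r'), ('w', 's'), ('x', 't'), ('y', 'u'), ('z', 'v'), ('A', 'W'), ('B', 'X'), ('C', 'Y'), ('D', 'Z'), ('E',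 'A'), ('F', 'B'), ('G', 'C'), ('H', 'D'), ('I', 'E'), ('J', 'F'), ('K', 'G'), ('L', 'H'), ('M', 'I'), ('N', 'J'), ('O', 'K'), ('P', 'L'), ('Q', 'M'), ('R', 'N'), ('S', 'O'), ('T', 'P'), ('U', 'Q'), ('V', 'R'), ('W', 'S'), ('X', 'T'), ('Y', 'U'), ('Z', 'V')] := by decide

set_option maxRecDepth 4000 in
lemma cyclingKeyA22 : ∀ c ∈ pvLetters, cyclingShift 22 c = ((cyclingTable (22 : Int)).get? c).getD c := by
  intro c hc
  rw [cyclingTab22]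
  fin_cases hc <;> decide

set_option maxRecDepth 6000 in
lemma cyclingTab23 : cyclingTable 23 = PySem.Dict.mk [('a', 'x'), ('b', 'y'), ('c', 'z'), ('d', 'a'), ('e', 'b'), ('f', 'c'), ('g', 'd'), ('h', 'e'), ('i', 'f'), ('j', 'g'), ('k', 'h'), ('l', 'i'), ('m', 'j'), ('n', 'k'), ('o', 'l'), ('p', 'm'), ('q', 'n'), ('r', 'o'), ('s', 'p'), ('t', 'q'), ('u', 'r'), ('v', 's'), ('w', 't'), ('x', 'u'), ('y', 'v'), ('z', 'w'), ('A', 'X'), ('B', 'Y'), ('C', 'Z'), ('D', 'A'), ('E', 'B'), ('F', 'C'), ('G', 'D'), ('H', 'E'), ('I', 'F'), ('J', 'G'), ('K', 'H'), ('L', 'I'), ('M', 'J'), ('N', 'K'), ('O', 'L'), ('P', 'M'), ('Q', 'N'), ('R', 'O'), ('S', 'P'), ('T', 'Q'), ('U', 'R'), ('V', 'S'), ('W', 'T'), ('X', 'U'), ('Y', 'V'), ('Z', 'W')] := by decide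

set_option maxRecDepth 4000 in
lemma cyclingKeyA23 : ∀ c ∈ pvLetters, cyclingShift 23 c = ((cyclingTable (23 : Int)).get? c).getD c := by
  intro c hc
  rw [cyclingTab23]
  fin_cases hc <;> decide

set_option maxRecDepth 6000 in
lemma cyclingTab24 : cyclingTable 24 = PySem.Dict.mk [('a', 'y'), ('b', 'z'), ('c', 'a'), ('d', 'b'), ('e', 'c'), ('f', 'd'), ('g', 'e'), ('h', 'f'), ('i', 'g'), ('j', 'h'), ('k', 'i'), ('l', 'j'), ('m', 'k'), ('n', 'l'), ('o', 'm'), ('p', 'n'), ('q', 'o'), ('r', 'p'), ('s', 'q'), ('t', 'r'), ('u', 's'), ('v', 't'), ('w', 'u'), ('x', 'v'), ('y', 'w'), ('z', 'x'), ('A', 'Y'), ('B', 'Z'), ('C', 'A'), ('D', 'B'), ('E', 'C'), ('F', 'D'), ('G', 'E'), ('H', 'F'), ('I', 'G'), ('J', 'H'), ('K', 'I'), ('L', 'J'), ('M', 'K'), ('N', 'L'), ('O', 'M'), ('P', 'N'), ('Q', 'O'), ('R', 'P'), ('S', 'Q'), ('T', 'R'), ('U', 'S'), ('V', 'T'), ('W',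 'U'), ('X', 'V'), ('Y', 'W'), ('Z', 'X')] := by decide

set_option maxRecDepth 4000 in
lemma cyclingKeyA24 : ∀ c ∈ pvLetters, cyclingShift 24 c = ((cyclingTable (24 : Int)).get? c).getD c := by
  intro c hc
  rw [cyclingTab24]
  fin_cases hc <;> decide

set_option maxRecDepth 6000 in
lemma cyclingTab25 : cyclingTable 25 = PySem.Dict.mk [('a', 'z'), ('b', 'a'), ('c', 'b'), ('d', 'c'), ('e', 'd'), ('f', 'e'), ('g', 'f'), ('h', 'g'), ('i', 'h'), ('j', 'i'), ('k', 'j'), ('l', 'k'), ('m', 'l'), ('n', 'm'), ('o', 'n'), ('p', 'o'), ('q', 'p'), ('r', 'q'), ('s', 'r'), ('t', 's'), ('u', 't'), ('v', 'u'), ('w', 'v'), ('x', 'w'), ('y', 'x'), ('z', 'y'), ('A', 'Z'), ('B', 'A'), ('C', 'B'), ('D', 'C'), ('E', 'D'), ('F', 'E'), ('G', 'F'), ('H', 'G'), ('I', 'H'), ('J', 'I'), ('K', 'J'), ('L', 'K'), ('M', 'L'), ('N', 'M'), ('O', 'N'), ('P', 'O'), ('Q', 'P'), ('R', 'Q'),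 ('S', 'R'), ('T', 'S'), ('U', 'T'), ('V', 'U'), ('W', 'V'), ('X', 'W'), ('Y', 'X'), ('Z', 'Y')] := by decide

set_option maxRecDepth 4000 in
lemma cyclingKeyA25 : ∀ c ∈ pvLetters, cyclingShift 25 c = ((cyclingTable (25 : Int)).get? c).getD c := by
  intro c hc
  rw [cyclingTab25]
  fin_cases hc <;> decide


set_option maxRecDepth 6000 in
lemma cycling_keys_table : ∀ s : Fin 26, (cyclingTable (s.val : Int)).keys = pvLetters := by
  intro s; fin_cases s <;> decide

lemma cycling_key_nonalpha (s : Fin 26) (c : Char) (h : PySem.Chars.isalpha c = false) :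
    ((cyclingTable (s.val : Int)).get? c).getD c = c := by
  have hk : (cyclingTable (s.val : Int)).get? c = none := by
    apply (PySem.Dict.get?_eq_none_iff_not_mem_keys _ _).2
    rw [cycling_keys_table s]
    intro hm
    rw [isalpha_of_mem_letters c hm] at h
    cases h
  rw [hk]
  rfl

lemma cycling_key (s : Fin 26) (c : Char) :
    cyclingShift s.val c = ((cyclingTable (s.val : Int)).get? c).getD c := by
  by_cases h : PySem.Chars.isalpha c = true
  · have hm := mem_letters_of_isalpha c h
    fin_cases s
    exacts [cyclingKeyA0 c hm, cyclingKeyA1 c hm, cyclingKeyA2 c hm, cyclingKeyA3 c hm,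
      cyclingKeyA4 c hm, cyclingKeyA5 c hm, cyclingKeyA6 c hm, cyclingKeyA7 c hm,
      cyclingKeyA8 c hm, cyclingKeyA9 c hm, cyclingKeyA10 c hm, cyclingKeyA11 c hm,
      cyclingKeyA12 c hm, cyclingKeyA13 c hm, cyclingKeyA14 c hm, cyclingKeyA15 c hm,
      cyclingKeyA16 c hm, cyclingKeyA17 c hm, cyclingKeyA18 c hm, cyclingKeyA19 c hm,
      cyclingKeyA20 c hm, cyclingKeyA21 c hm, cyclingKeyA22 c hm, cyclingKeyA23 c hm,
      cyclingKeyA24 c hm, cyclingKeyA25 c hm]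
  · have h' : PySem.Chars.isalpha c = false := by simpa using h
    rw [cycling_key_nonalpha s c h']
    simp [cyclingShift, h']

lemma cycling_eq_map (word : String) :
    cycling word = String.ofList (word.toList.map
      (cyclingShift (word.toList.countP PySem.Chars.isalpha))) := by
  simp only [cycling]
  have hz : word.toList.foldl (fun z i => if PySem.Chars.isalpha i = true then z ++ [i] else z)
      ([] : List Char) = word.toList.filter PySem.Chars.isalpha := by
    simpa using PySem.List.foldl_append_if PySem.Chars.isalpha id word.toList []
  rw [hz, ← List.countP_eq_length_filter]
  have := cycling_loop (cyclingShift (word.toList.countP PySem.Chars.isalpha)) word.toList []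
  simp only [List.nil_append, List.length_nil, Nat.cast_zero, Nat.zero_add] at this
  exact congrArg String.ofList this

-- ===== VERDICT (by name: the statement is the Claim_ definition above) =====
theorem cycling_spec : Claim_equal_cycling := by
  intro word _hdom
  unfold Spec_cycling cycling_alt
  rw [cycling_eq_map]
  rw [PySem.List.sum_map_ite_one_zero]
  set n := word.toList.countP PySem.Chars.isalpha with hn
  have hmod : PySem.Int.mod ((n : Int)) 26 = ((n % 26 : Nat) : Int) := by
    exact_mod_cast PySem.Int.mod_natCast n 26
  rw [hmod]
  congr 1
  apply List.map_congr_left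
  intro c _hc
  rw [cyclingShift_mod]
  exact cycling_key ⟨n % 26, Nat.mod_lt _ (by norm_num)⟩ c
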